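-- pv_equiv track=rewrite | github.com/Timothy2105/tidybot-autonav | astar_planner.py | _compress_collinear
-- ===== SOURCE A (Python) =====
-- def _compress_collinear(path_grid):
--     if len(path_grid) <= 2:
--         return path_grid[:]
--     out = [path_grid[0]]
--     prev = path_grid[0]
--     dprev = None
--     for cur in path_grid[1:]:
--         dr = cur[0] - prev[0]
--         dc = cur[1] - prev[1]
--         # normalize to {-1,0,1}
--         dr = 0 if dr == 0 else (1 if dr > 0 else -1)
--         dc = 0 if dc == 0 else (1 if dc > 0 else -1)
--         d = (dr, dc)
--         if d != dprev:
--             out.append(cur)  # start new run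
--             dprev = d
--         else:
--             out[-1] = cur     # extend current run's end
--         prev = cur
--     return out
-- ===== SOURCE B (Python) =====
-- def _sgn(x):
--     return (x > 0) - (x < 0)
--
--
-- def _compress_collinear(path_grid):
--     if len(path_grid) <= 2:
--         return path_grid[:]
--     # pass 1: table of normalized step directions for every consecutive pair
--     dirs = [(_sgn(b[0] - a[0]), _sgn(b[1] - a[1]))
--             for a, b in zip(path_grid, path_grid[1:])]
--     # pass 2: an interior point is kept exactly when its outgoing direction
--     # differs from its incoming direction (a turn); endpoints are always kept
--     mids = [p for p, din, dout in zip(path_grid[1:], dirs, dirs[1:]) if dout != din]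
--     return [path_grid[0]] + mids + [path_grid[-1]]
-- ===== Notes on version B (the rewrite author's own statement) =====
-- stated objective: alternative
-- what changed: Replaces the single-pass running-state loop (append/overwrite of the last element, running prev/dprev) with a two-pass table-then-select structure: first a table of normalized step directions, then a zip-comprehension keeping exactly the turn points between the two endpoints.
import Mathlib
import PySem

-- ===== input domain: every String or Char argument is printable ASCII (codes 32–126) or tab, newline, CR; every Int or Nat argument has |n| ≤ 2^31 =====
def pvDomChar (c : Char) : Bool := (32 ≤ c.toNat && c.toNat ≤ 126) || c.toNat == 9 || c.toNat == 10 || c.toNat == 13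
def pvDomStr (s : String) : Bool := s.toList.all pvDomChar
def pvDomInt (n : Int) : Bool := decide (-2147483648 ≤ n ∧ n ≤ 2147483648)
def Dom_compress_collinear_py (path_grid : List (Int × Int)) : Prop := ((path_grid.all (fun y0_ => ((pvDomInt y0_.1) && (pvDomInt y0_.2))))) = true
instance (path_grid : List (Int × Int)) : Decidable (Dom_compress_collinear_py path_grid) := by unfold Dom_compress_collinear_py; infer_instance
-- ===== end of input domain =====

-- B replaces A's single running-state loop (append / overwrite-last, prev/dprev state) with a
-- two-pass table-then-select structure of the same cost (objective: alternative).

-- ===== PORT A =====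
-- the for-loop of A: state is (out, prev, dprev); 'out.append(cur)' = out ++ [cur],
-- 'out[-1] = cur' = out.dropLast ++ [cur] (out is always nonempty here)
def pvALoop (rest : List (Int × Int)) (out : List (Int × Int)) (prev : Int × Int)
    (dprev : Option (Int × Int)) : List (Int × Int) :=
  match rest with
  | [] => out
  | cur :: rest' =>
    let dr := cur.1 - prev.1
    let dc := cur.2 - prev.2
    let dr := if dr = 0 then (0 : Int) else if dr > 0 then 1 else -1
    let dc := if dc = 0 then (0 : Int) else if dc > 0 then 1 else -1
    let d := (dr, dc)
    if some d ≠ dprev then pvALoop rest' (out ++ [cur]) cur (some d)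
    else pvALoop rest' (out.dropLast ++ [cur]) cur dprev

def compress_collinear_py (path_grid : List (Int × Int)) : List (Int × Int) :=
  if path_grid.length ≤ 2 then path_grid
  else
    match path_grid with
    | [] => []  -- unreachable: length > 2
    | p0 :: rest => pvALoop rest [p0] p0 none

-- ===== PORT B =====
-- Python's (x > 0) - (x < 0)
def pvSgn (x : Int) : Int := (if x > 0 then 1 else 0) - (if x < 0 then 1 else 0)

def compress_collinear_py_alt (path_grid : List (Int × Int)) : List (Int × Int) :=
  if path_grid.length ≤ 2 then path_grid
  else
    -- dirs = [(sgn(b0-a0), sgn(b1-a1)) for a,b in zip(path_grid, path_grid[1:])]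
    let dirs := (path_grid.zip path_grid.tail).map
      (fun ab => (pvSgn (ab.2.1 - ab.1.1), pvSgn (ab.2.2 - ab.1.2)))
    -- three-way zip modelled as nested pairs (p, (din, dout)); guard: dout != din
    let mids := ((path_grid.tail.zip (dirs.zip dirs.tail)).filter
      (fun x => x.2.2 ≠ x.2.1)).map (fun x => x.1)
    -- path_grid[0] and path_grid[-1]: exact here since the list is nonempty
    [path_grid.headD (0, 0)] ++ mids ++ [path_grid.getLastD (0, 0)]

-- ===== PRECONDITION & SPEC =====
def Spec_compress_collinear_py (path_grid : List (Int × Int)) (out : List (Int × Int)) : Prop := out = compress_collinear_py_alt path_grid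
instance (path_grid : List (Int × Int)) (out : List (Int × Int)) : Decidable (Spec_compress_collinear_py path_grid out) := by unfold Spec_compress_collinear_py; infer_instance

-- ===== CLAIM (what is proved, stated in full; the proofs are below) =====
def Claim_equal_compress_collinear_py : Prop := ∀ (path_grid : List (Int × Int)), Dom_compress_collinear_py path_grid → Spec_compress_collinear_py path_grid (compress_collinear_py path_grid)

-- ===== LEMMAS AND PROOFS =====

-- normalized direction of one step (B's form)
def pvDir (p q : Int × Int) : Int × Int := (pvSgn (q.1 - p.1), pvSgn (q.2 - p.2))

-- A's inline normalization, as a named function for the proofs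
def pvDirA (p q : Int × Int) : Int × Int :=
  ((if q.1 - p.1 = 0 then (0 : Int) else if q.1 - p.1 > 0 then 1 else -1),
   (if q.2 - p.2 = 0 then (0 : Int) else if q.2 - p.2 > 0 then 1 else -1))

theorem pvDirA_eq (p q : Int × Int) : pvDirA p q = pvDir p q := by
  unfold pvDirA pvDir pvSgn
  simp only [Prod.mk.injEq]
  constructor <;> (split_ifs <;> omega)

theorem pvALoop_cons (cur : Int × Int) (rest' out : List (Int × Int)) (prev : Int × Int)
    (dprev : Option (Int × Int)) :
    pvALoop (cur :: rest') out prev dprev =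
      if some (pvDirA prev cur) ≠ dprev then
        pvALoop rest' (out ++ [cur]) cur (some (pvDirA prev cur))
      else pvALoop rest' (out.dropLast ++ [cur]) cur dprev := rfl

-- the points A keeps from 'cur :: rest' when the incoming direction of cur is din
def pvKeep (din : Int × Int) (cur : Int × Int) (rest : List (Int × Int)) : List (Int × Int) :=
  match rest with
  | [] => [cur]
  | nxt :: rest' =>
    (if pvDir cur nxt ≠ din then [cur] else []) ++ pvKeep (pvDir cur nxt) nxt rest'

theorem pvALoop_out (rest : List (Int × Int)) (init : List (Int × Int)) (l prev : Int × Int)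
    (dprev : Option (Int × Int)) :
    pvALoop rest (init ++ [l]) prev dprev =
      init ++ pvALoop rest [l] prev dprev := by
  induction rest generalizing init l prev dprev with
  | nil => simp [pvALoop]
  | cons cur rest' ih =>
    rw [pvALoop_cons, pvALoop_cons cur rest' [l]]
    by_cases h : some (pvDirA prev cur) = dprev
    · simp only [h, ne_eq, not_true_eq_false, if_false]
      rw [List.dropLast_concat, show ([l] : List (Int × Int)).dropLast ++ [cur] = [] ++ [cur] by simp,
        ih, ih []]
      simp
    · simp only [ne_eq, h, not_false_eq_true, if_true]
      rw [show init ++ [l] ++ [cur] = (init ++ [l]) ++ [cur] by simp, ih, ih [l]]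
      simp

theorem pvALoop_keep (rest : List (Int × Int)) (cur din : Int × Int) :
    pvALoop rest [cur] cur (some din) = pvKeep din cur rest := by
  induction rest generalizing cur din with
  | nil => simp [pvALoop, pvKeep]
  | cons nxt rest' ih =>
    rw [pvALoop_cons, pvDirA_eq]
    by_cases h : pvDir cur nxt = din
    · simp only [h, ne_eq, not_true_eq_false, if_false]
      rw [show ([cur] : List (Int × Int)).dropLast ++ [nxt] = [nxt] by simp, ← h, ih]
      simp [pvKeep, h]
    · simp only [ne_eq, Option.some.injEq, h, not_false_eq_true, if_true]
      rw [show ([cur] : List (Int × Int)) ++ [nxt] = [cur] ++ [nxt] from rfl, pvALoop_out, ih]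
      simp [pvKeep, h]

-- B's select pass, written over the cons structure, equals pvKeep
theorem pvB_keep (rest : List (Int × Int)) (p0 p1 : Int × Int) :
    (( ((p1 :: rest).zip
        ((((p0 :: p1 :: rest).zip (p1 :: rest)).map
          (fun ab => (pvSgn (ab.2.1 - ab.1.1), pvSgn (ab.2.2 - ab.1.2)))).zip
         (((p1 :: rest).zip rest).map
          (fun ab => (pvSgn (ab.2.1 - ab.1.1), pvSgn (ab.2.2 - ab.1.2)))))).filter
       (fun x => x.2.2 ≠ x.2.1)).map (fun x => x.1))
      ++ [(p1 :: rest).getLastD (0, 0)]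
    = pvKeep (pvDir p0 p1) p1 rest := by
  induction rest generalizing p0 p1 with
  | nil => simp [pvKeep]
  | cons p2 rest' ih =>
    simp only [List.zip_cons_cons, List.map_cons, List.filter_cons, pvKeep]
    rw [← ih p1 p2]
    by_cases h : pvDir p1 p2 = pvDir p0 p1
    · simp only [pvDir] at h
      simp [h, pvDir]
    · have h' : ¬ ((pvSgn (p2.1 - p1.1), pvSgn (p2.2 - p1.2)) =
        (pvSgn (p1.1 - p0.1), pvSgn (p1.2 - p0.2))) := by simpa [pvDir] using h
      simp [h', pvDir]

-- ===== VERDICT (by name: the statement is the Claim_ definition above) =====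
theorem compress_collinear_py_spec : Claim_equal_compress_collinear_py := by
  intro path_grid _
  unfold Spec_compress_collinear_py compress_collinear_py compress_collinear_py_alt
  by_cases hl : path_grid.length ≤ 2
  · simp [hl]
  · simp only [if_neg hl]
    cases path_grid with
    | nil => simp at hl
    | cons p0 t =>
      cases t with
      | nil => simp at hl
      | cons p1 rest =>
        simp only [List.tail_cons, List.headD_cons]
        have h0 : pvALoop (p1 :: rest) [p0] p0 none =
            [p0] ++ pvALoop rest [p1] p1 (some (pvDirA p0 p1)) := by
          rw [pvALoop_cons]
          simp only [ne_eq, reduceCtorEq, not_false_eq_true, if_true]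
          rw [show ([p0] : List (Int × Int)) ++ [p1] = [p0] ++ [p1] from rfl, pvALoop_out]
        rw [h0, pvDirA_eq, pvALoop_keep, ← pvB_keep rest p0 p1]
        simp
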